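-- pv_equiv track=rewrite | github.com/Namtk214/diffuse_nnx | disc/utils.py | _gen_positions_1d
-- ===== SOURCE A (Python) =====
-- from typing import List, Tuple
--
-- def _linspace_indices(limit: int, count: int) -> List[int]:
--     if count <= 1:
--         return [0]
--     return sorted({int(round(i * (limit / (count - 1)))) for i in range(count)})
--
-- def _gen_positions_1d(length: int, crop: int, slots: int) -> List[int]:
--     limit = max(length - crop, 0)
--     pos = _linspace_indices(limit, max(slots, 1))
--     pos = [max(0, min(p, limit)) for p in pos]
--     if slots > 1:
--         pos[0] = 0
--         pos[-1] = limit
--     return pos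
-- ===== SOURCE B (Python) =====
-- def _gen_positions_1d(length: int, crop: int, slots: int):
--     # Output-sensitive walk: the rounded linspace values are non-decreasing, so
--     # instead of generating all of them and sorting a set, binary-search for the
--     # index of the NEXT larger value; the float expression is evaluated only
--     # O(k log n) times for k distinct positions.
--     limit = max(length - crop, 0)
--     count = max(slots, 1)
--     if count <= 1:
--         pos = [0]
--     else:
--         step = limit / (count - 1)
--         def val(i):
--             return int(round(i * step))
--         pos = [val(0)]
--         i = 0
--         while i < count - 1:
--             v = pos[-1]
--             if val(count - 1) <= v:
--                 break
--             lo, hi = i + 1, count - 1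
--             while lo < hi:
--                 mid = (lo + hi) // 2
--                 if val(mid) > v:
--                     hi = mid
--                 else:
--                     lo = mid + 1
--             pos.append(val(lo))
--             i = lo
--     pos = [max(0, min(p, limit)) for p in pos]
--     if slots > 1:
--         pos[0] = 0
--         pos[-1] = limit
--     return pos
-- ===== Notes on version B (the rewrite author's own statement) =====
-- stated objective: alternative
-- what changed: B replaces A's generate-all-then-set-then-sort by an output-sensitive walk: since the rounded linspace values are non-decreasing in the index, B repeatedly binary-searches for the smallest index whose value exceeds the last emitted one, so the float expression is evaluated only O(k log n) times for the k distinct positions instead of n times plus hashing and sorting.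
import Mathlib
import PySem

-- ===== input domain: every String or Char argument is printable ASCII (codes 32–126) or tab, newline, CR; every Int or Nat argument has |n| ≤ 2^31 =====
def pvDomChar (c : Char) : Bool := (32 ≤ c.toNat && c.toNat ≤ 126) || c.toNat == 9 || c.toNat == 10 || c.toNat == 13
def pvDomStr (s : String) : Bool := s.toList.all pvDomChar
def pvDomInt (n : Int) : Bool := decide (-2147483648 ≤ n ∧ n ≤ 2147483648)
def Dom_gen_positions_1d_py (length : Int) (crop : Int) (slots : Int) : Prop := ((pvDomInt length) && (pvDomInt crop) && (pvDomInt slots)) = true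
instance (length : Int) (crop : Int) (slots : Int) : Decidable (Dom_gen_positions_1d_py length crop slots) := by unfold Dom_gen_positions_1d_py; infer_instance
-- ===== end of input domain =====

-- B replaces A's generate-all + set + sort of the (non-decreasing) rounded linspace values by an
-- output-sensitive walk that binary-searches for the index of the next distinct value.
-- The Python float expression int(round(i * (limit / (count-1)))) is modelled exactly by
-- integer IEEE-754 double arithmetic (round-to-nearest-even), see pvFN below.


-- ===== shared float model (PySem has no floats; this is an exact integer model of the
-- one float expression both Pythons contain: int(round(i * (limit / d)))) =====

-- round-half-to-even of the rational a / b (Python's round(); exact for b > 0)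
def pvRN (a b : Nat) : Nat :=
  if 2 * (a % b) < b then a / b
  else if b < 2 * (a % b) then a / b + 1
  else if (a / b) % 2 = 0 then a / b else a / b + 1

-- floor of log2 with explicit fuel (structural, kernel-reducible; exact for 1 ≤ n < 2^fuel)
def pvLog2 : Nat → Nat → Nat
  | 0, _ => 0
  | fuel + 1, n => if n ≤ 1 then 0 else pvLog2 fuel (n / 2) + 1

-- round a nonnegative integer to 53 significant bits, ties to even
-- (= the IEEE-754 double nearest to n, as an exact integer; exact for n < 2^400)
def pvRnd53 (n : Nat) : Nat :=
  if n < 2 ^ 53 then n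
  else pvRN n (2 ^ (pvLog2 400 n - 52)) * 2 ^ (pvLog2 400 n - 52)

-- exact value of the Python expression int(round(i * (limit / d))) under IEEE-754
-- binary64 round-to-nearest-even, for 0 ≤ limit ≤ 2^32, 1 ≤ d ≤ 2^32, 0 ≤ i ≤ d:
-- q = fl(limit/d) is the double m·2^(b-136) with m = RN(limit·2^(136-b)/d), 2^b ≤ limit·2^84/d < 2^(b+1);
-- fl(i·q) = Rnd53(i·m)·2^(b-136); round() ties-to-even on that exact dyadic rational.
def pvFN (limit d i : Nat) : Nat :=
  if limit = 0 then 0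
  else
    pvRN (pvRnd53 (i * pvRN (limit * 2 ^ (136 - pvLog2 400 (limit * 2 ^ 84 / d))) d))
      (2 ^ (136 - pvLog2 400 (limit * 2 ^ 84 / d)))

def pvF (limit d i : Int) : Int := (pvFN limit.toNat d.toNat i.toNat : Int)

-- ===== PORT A =====
-- sorted({int(round(i * (limit / (count - 1)))) for i in range(count)}) if count > 1 else [0]
def linspace_indices_py (limit : Int) (count : Int) : List Int :=
  if count ≤ 1 then [0]
  else
    PySem.List.sorted
      (PySem.Set.ofList ((PySem.List.pyRange 0 count 1).map (fun i => pvF limit (count - 1) i)))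
      (fun x => x) false

def gen_positions_1d_py (length : Int) (crop : Int) (slots : Int) : List Int :=
  let limit := max (length - crop) 0
  let pos := linspace_indices_py limit (max slots 1)
  let pos := pos.map (fun p => max 0 (min p limit))
  if 1 < slots then
    PySem.List.pySetD (PySem.List.pySetD pos 0 0) (-1) limit   -- pos[0] = 0; pos[-1] = limit (pos is never empty)
  else pos

-- ===== PORT B =====
-- the inner `while lo < hi` of B: least j in [lo, hi] with v < f j (f non-decreasing, v < f hi).
-- The first Nat argument is fuel (any fuel ≥ hi - lo gives the loop's value), a pure totality guard.
def pvBsearch (f : Nat → Int) (v : Int) : Nat → Nat → Nat → Nat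
  | 0, lo, _hi => lo
  | fuel + 1, lo, hi =>
    if lo < hi then
      let mid := (lo + hi) / 2
      if v < f mid then pvBsearch f v fuel lo mid else pvBsearch f v fuel (mid + 1) hi
    else lo

-- the outer `while i < count - 1` of B: repeatedly append the next distinct value.
-- The first Nat argument is fuel (any fuel ≥ n - i gives the loop's value), a pure totality guard.
def pvWalk (f : Nat → Int) (n : Nat) : Nat → Nat → List Int → List Int
  | 0, _i, acc => acc
  | fuel + 1, i, acc =>
    if i < n then
      let v := acc.getLast?.getD 0           -- pos[-1] (acc is never empty)
      if f n ≤ v then acc                    -- val(count-1) <= v: break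
      else
        let j := pvBsearch f v (n - (i + 1)) (i + 1) n
        pvWalk f n fuel j (acc ++ [f j])
    else acc

def gen_positions_1d_py_alt (length : Int) (crop : Int) (slots : Int) : List Int :=
  let limit := max (length - crop) 0
  let count := max slots 1
  let pos :=
    if count ≤ 1 then [0]
    else
      let f : Nat → Int := fun k => pvF limit (count - 1) ((k : Int))   -- val(i)
      pvWalk f (count - 1).toNat (count - 1).toNat 0 [f 0]
  let pos := pos.map (fun p => max 0 (min p limit))
  if 1 < slots then
    PySem.List.pySetD (PySem.List.pySetD pos 0 0) (-1) limit   -- pos[0] = 0; pos[-1] = limit (pos is never empty)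
  else pos

-- ===== PRECONDITION & SPEC =====
def Spec_gen_positions_1d_py (length : Int) (crop : Int) (slots : Int) (out : List Int) : Prop := out = gen_positions_1d_py_alt length crop slots
instance (length : Int) (crop : Int) (slots : Int) (out : List Int) : Decidable (Spec_gen_positions_1d_py length crop slots out) := by unfold Spec_gen_positions_1d_py; infer_instance

-- ===== CLAIM (what is proved, stated in full; the proofs are below) =====
def Claim_equal_gen_positions_1d_py : Prop := ∀ (length : Int) (crop : Int) (slots : Int), Dom_gen_positions_1d_py length crop slots → Spec_gen_positions_1d_py length crop slots (gen_positions_1d_py length crop slots)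

-- ===== LEMMAS AND PROOFS =====

-- pvRN bounds and monotonicity
lemma pvRN_lb (a b : Nat) : a / b ≤ pvRN a b := by
  unfold pvRN; split_ifs <;> omega

lemma pvRN_ub (a b : Nat) : pvRN a b ≤ a / b + 1 := by
  unfold pvRN; split_ifs <;> omega

lemma pvRN_mono {a a' : Nat} (b : Nat) (hb : 0 < b) (h : a ≤ a') : pvRN a b ≤ pvRN a' b := by
  unfold pvRN
  have e1 := Nat.div_add_mod a b
  have e2 := Nat.div_add_mod a' b
  have l1 := Nat.mod_lt a hb
  have l2 := Nat.mod_lt a' hb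
  rcases Nat.lt_or_ge (a / b) (a' / b) with hq | hq
  · split_ifs <;> omega
  · have hqe : a / b = a' / b :=
      Nat.le_antisymm (Nat.div_le_div_right h) hq
    rw [← hqe] at e2
    rw [← hqe]
    split_ifs <;> omega

-- pvLog2 characterisation (enough fuel)
lemma pvLog2_char : ∀ (fuel n : Nat), 1 ≤ n → n < 2 ^ fuel →
    2 ^ pvLog2 fuel n ≤ n ∧ n < 2 ^ (pvLog2 fuel n + 1) := by
  intro fuel
  induction fuel with
  | zero => intro n h1 h2; simp at h2; omega
  | succ f ih =>
    intro n h1 h2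
    unfold pvLog2
    by_cases hn : n ≤ 1
    · simp [hn]; omega
    · simp only [hn, if_false]
      have h1' : 1 ≤ n / 2 := by omega
      have h2' : n / 2 < 2 ^ f := by
        have : 2 ^ (f + 1) = 2 * 2 ^ f := by ring
        omega
      have := ih (n / 2) h1' h2'
      constructor
      · have : 2 ^ (pvLog2 f (n / 2) + 1) = 2 * 2 ^ pvLog2 f (n / 2) := by ring
        omega
      · have e1 : 2 ^ (pvLog2 f (n / 2) + 1 + 1) = 2 * 2 ^ (pvLog2 f (n / 2) + 1) := by ring
        omega

lemma pvLog2_ge53 {n : Nat} (hn : 2 ^ 53 ≤ n) (hlt : n < 2 ^ 400) : 53 ≤ pvLog2 400 n := by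
  have hc := pvLog2_char 400 n (by omega) hlt
  have h1 : (2 : Nat) ^ 53 < 2 ^ (pvLog2 400 n + 1) := lt_of_le_of_lt hn hc.2
  have := (Nat.pow_lt_pow_iff_right (by norm_num : 1 < 2)).mp h1
  omega

lemma big_lb {n : Nat} (hn : 2 ^ 53 ≤ n) (hlt : n < 2 ^ 400) :
    2 ^ pvLog2 400 n ≤ pvRN n (2 ^ (pvLog2 400 n - 52)) * 2 ^ (pvLog2 400 n - 52) := by
  have hc := pvLog2_char 400 n (by omega) hlt
  have h53 := pvLog2_ge53 hn hlt
  have hsplit : (2 : Nat) ^ pvLog2 400 n = 2 ^ 52 * 2 ^ (pvLog2 400 n - 52) := by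
    rw [← pow_add]; congr 1; omega
  have hdiv : 2 ^ 52 ≤ n / 2 ^ (pvLog2 400 n - 52) :=
    (Nat.le_div_iff_mul_le (Nat.two_pow_pos _)).mpr (by rw [← hsplit]; exact hc.1)
  calc 2 ^ pvLog2 400 n = 2 ^ 52 * 2 ^ (pvLog2 400 n - 52) := hsplit
    _ ≤ (n / 2 ^ (pvLog2 400 n - 52)) * 2 ^ (pvLog2 400 n - 52) :=
        Nat.mul_le_mul_right _ hdiv
    _ ≤ pvRN n (2 ^ (pvLog2 400 n - 52)) * 2 ^ (pvLog2 400 n - 52) :=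
        Nat.mul_le_mul_right _ (pvRN_lb _ _)

lemma big_ub {n : Nat} (hn : 2 ^ 53 ≤ n) (hlt : n < 2 ^ 400) :
    pvRN n (2 ^ (pvLog2 400 n - 52)) * 2 ^ (pvLog2 400 n - 52) ≤ 2 ^ (pvLog2 400 n + 1) := by
  have hc := pvLog2_char 400 n (by omega) hlt
  have h53 := pvLog2_ge53 hn hlt
  have hsplit : (2 : Nat) ^ (pvLog2 400 n + 1) = 2 ^ 53 * 2 ^ (pvLog2 400 n - 52) := by
    rw [← pow_add]; congr 1; omega
  have hdiv : n / 2 ^ (pvLog2 400 n - 52) < 2 ^ 53 :=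
    (Nat.div_lt_iff_lt_mul (Nat.two_pow_pos _)).mpr (by rw [← hsplit]; exact hc.2)
  have hrn : pvRN n (2 ^ (pvLog2 400 n - 52)) ≤ 2 ^ 53 :=
    le_trans (pvRN_ub _ _) (by omega)
  calc pvRN n (2 ^ (pvLog2 400 n - 52)) * 2 ^ (pvLog2 400 n - 52)
      ≤ 2 ^ 53 * 2 ^ (pvLog2 400 n - 52) := Nat.mul_le_mul_right _ hrn
    _ = 2 ^ (pvLog2 400 n + 1) := hsplit.symm

lemma pvRnd53_mono {n n' : Nat} (h : n ≤ n') (hn' : n' < 2 ^ 400) :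
    pvRnd53 n ≤ pvRnd53 n' := by
  have hn : n < 2 ^ 400 := lt_of_le_of_lt h hn'
  unfold pvRnd53
  split_ifs with h1 h2 h2
  · exact h
  · -- n < 2^53 ≤ n'
    have hb' : 2 ^ 53 ≤ n' := by omega
    have h53' := pvLog2_ge53 hb' hn'
    calc n ≤ 2 ^ 53 := by omega
      _ ≤ 2 ^ pvLog2 400 n' := Nat.pow_le_pow_right (by norm_num) h53'
      _ ≤ _ := big_lb hb' hn'
  · omega
  · -- both ≥ 2^53
    have hb : 2 ^ 53 ≤ n := by omega
    have hb' : 2 ^ 53 ≤ n' := by omega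
    have hc := pvLog2_char 400 n (by omega) hn
    have hc' := pvLog2_char 400 n' (by omega) hn'
    have hLL : pvLog2 400 n ≤ pvLog2 400 n' := by
      have : (2 : Nat) ^ pvLog2 400 n < 2 ^ (pvLog2 400 n' + 1) :=
        lt_of_le_of_lt (le_trans hc.1 h) hc'.2
      have := (Nat.pow_lt_pow_iff_right (by norm_num : 1 < 2)).mp this
      omega
    rcases Nat.eq_or_lt_of_le hLL with heq | hlt
    · rw [heq]
      exact Nat.mul_le_mul_right _ (pvRN_mono _ (Nat.two_pow_pos _) h)
    · calc pvRN n (2 ^ (pvLog2 400 n - 52)) * 2 ^ (pvLog2 400 n - 52)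
          ≤ 2 ^ (pvLog2 400 n + 1) := big_ub hb hn
        _ ≤ 2 ^ pvLog2 400 n' := Nat.pow_le_pow_right (by norm_num) (by omega)
        _ ≤ _ := big_lb hb' hn'

lemma pvFN_mono {limit d i j : Nat} (hlim : limit ≤ 2 ^ 32) (hj : j ≤ 2 ^ 32) (hij : i ≤ j) :
    pvFN limit d i ≤ pvFN limit d j := by
  unfold pvFN
  split_ifs with h0
  · exact le_refl _
  · apply pvRN_mono _ (Nat.two_pow_pos _)
    have hm : pvRN (limit * 2 ^ (136 - pvLog2 400 (limit * 2 ^ 84 / d))) d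
        ≤ limit * 2 ^ 136 + 1 := by
      refine le_trans (pvRN_ub _ _) ?_
      have h1 : limit * 2 ^ (136 - pvLog2 400 (limit * 2 ^ 84 / d)) ≤ limit * 2 ^ 136 :=
        Nat.mul_le_mul_left _ (Nat.pow_le_pow_right (by norm_num) (by omega))
      exact Nat.add_le_add_right
        (le_trans (Nat.div_le_self _ _) h1) 1
    apply pvRnd53_mono (Nat.mul_le_mul hij (le_refl _))
    calc j * pvRN (limit * 2 ^ (136 - pvLog2 400 (limit * 2 ^ 84 / d))) d
        ≤ 2 ^ 32 * (2 ^ 32 * 2 ^ 136 + 1) := by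
          exact Nat.mul_le_mul hj (le_trans hm
            (Nat.add_le_add_right (Nat.mul_le_mul_right _ hlim) 1))
      _ ≤ 2 ^ 32 * 2 ^ 169 := by
          refine Nat.mul_le_mul_left _ ?_
          have e1 : (2:Nat) ^ 32 * 2 ^ 136 = 2 ^ 168 := by rw [← pow_add]
          rw [e1]
          omega
      _ = 2 ^ 201 := by rw [← pow_add]
      _ < 2 ^ 400 := Nat.pow_lt_pow_right (by norm_num) (by norm_num)

lemma pvF_mono {limit d : Int} {i j : Int} (hlim : limit ≤ 2 ^ 32) (hj : j ≤ 2 ^ 32)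
    (hij : i ≤ j) : pvF limit d i ≤ pvF limit d j := by
  unfold pvF
  have h1 : limit.toNat ≤ 2 ^ 32 := by omega
  have h2 : j.toNat ≤ 2 ^ 32 := by omega
  have h3 : i.toNat ≤ j.toNat := by omega
  exact_mod_cast pvFN_mono h1 h2 h3

-- full specification of the binary search: for f non-decreasing on [0, hi], v < f hi and
-- enough fuel, it returns the least j in [lo, hi] with v < f j
lemma pvBsearch_ge (f : Nat → Int) (v : Int) :
    ∀ (m lo hi : Nat), lo ≤ pvBsearch f v m lo hi := by
  intro m
  induction m with
  | zero => intro lo hi; exact le_rfl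
  | succ m ih =>
    intro lo hi
    unfold pvBsearch
    by_cases hlt : lo < hi
    · rw [if_pos hlt]
      by_cases hv : v < f ((lo + hi) / 2)
      · simp only [if_pos hv]; exact ih lo ((lo + hi) / 2)
      · simp only [if_neg hv]
        have := ih ((lo + hi) / 2 + 1) hi
        omega
    · rw [if_neg hlt]

lemma pvBsearch_spec (f : Nat → Int) (v : Int) :
    ∀ (m lo hi : Nat), hi - lo ≤ m → lo ≤ hi →
      (∀ a b : Nat, a ≤ b → b ≤ hi → f a ≤ f b) → v < f hi →
      pvBsearch f v m lo hi ≤ hi ∧ v < f (pvBsearch f v m lo hi) ∧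
        (∀ k, lo ≤ k → k < pvBsearch f v m lo hi → f k ≤ v) := by
  intro m
  induction m with
  | zero =>
    intro lo hi h hle hf hv
    have he : lo = hi := by omega
    subst he
    exact ⟨le_rfl, hv, fun k h1 h2 => by simp [pvBsearch] at h2; omega⟩
  | succ m ih =>
    intro lo hi h hle hf hv
    unfold pvBsearch
    by_cases hlt : lo < hi
    · rw [if_pos hlt]
      by_cases hmid : v < f ((lo + hi) / 2)
      · simp only [if_pos hmid]
        have := ih lo ((lo + hi) / 2) (by omega) (by omega)
          (fun a b hab hb => hf a b hab (by omega)) hmid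
        exact ⟨by omega, this.2.1, this.2.2⟩
      · simp only [if_neg hmid]
        have hmle : f ((lo + hi) / 2) ≤ v := le_of_not_gt hmid
        have := ih ((lo + hi) / 2 + 1) hi (by omega) (by omega) hf hv
        refine ⟨this.1, this.2.1, fun k h1 h2 => ?_⟩
        by_cases hk : k ≤ (lo + hi) / 2
        · exact le_trans (hf k ((lo + hi) / 2) hk (by omega)) hmle
        · exact this.2.2 k (by omega) h2
    · rw [if_neg hlt]
      have he : lo = hi := by omega
      subst he
      exact ⟨le_rfl, hv, fun k h1 h2 => by omega⟩

-- invariant of the walk: strictly increasing, and exactly the set of values of f on [0, n]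
lemma pvWalk_spec (f : Nat → Int) (n : Nat) (hf : ∀ a b : Nat, a ≤ b → b ≤ n → f a ≤ f b) :
    ∀ (m i : Nat) (acc : List Int), n - i ≤ m → i ≤ n →
      acc.getLast? = some (f i) →
      acc.Pairwise (· < ·) →
      (∀ y ∈ acc, y ≤ f i) →
      (∀ x, x ∈ acc ↔ ∃ k, k ≤ i ∧ f k = x) →
      (pvWalk f n m i acc).Pairwise (· < ·) ∧
        (∀ x, x ∈ pvWalk f n m i acc ↔ ∃ k, k ≤ n ∧ f k = x) := by
  intro m
  induction m with
  | zero =>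
    intro i acc h hle hlast hpw hub hmem
    have : i = n := by omega
    subst this
    exact ⟨hpw, fun x => hmem x⟩
  | succ m ih =>
    intro i acc h hle hlast hpw hub hmem
    unfold pvWalk
    by_cases hin : i < n
    · rw [if_pos hin]
      simp only [hlast, Option.getD_some]
      by_cases hbr : f n ≤ f i
      · simp only [if_pos hbr]
        refine ⟨hpw, fun x => ⟨fun hx => ?_, fun ⟨k, hk, hfk⟩ => ?_⟩⟩
        · obtain ⟨k, hk, hfk⟩ := (hmem x).mp hx
          exact ⟨k, by omega, hfk⟩
        · by_cases hki : k ≤ i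
          · exact (hmem x).mpr ⟨k, hki, hfk⟩
          · have h1 : f i ≤ f k := hf i k (by omega) hk
            have h2 : f k ≤ f n := hf k n hk le_rfl
            have : f k = f i := by omega
            exact (hmem x).mpr ⟨i, le_rfl, by omega⟩
      · simp only [if_neg hbr]
        have hv : f i < f n := lt_of_not_ge hbr
        have hspec := pvBsearch_spec f (f i) (n - (i + 1)) (i + 1) n le_rfl (by omega) hf hv
        have hge : i + 1 ≤ pvBsearch f (f i) (n - (i + 1)) (i + 1) n :=
          pvBsearch_ge f (f i) (n - (i + 1)) (i + 1) n
        set j := pvBsearch f (f i) (n - (i + 1)) (i + 1) n with hj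
        obtain ⟨hjle, hjgt, hjmin⟩ := hspec
        refine ih j (acc ++ [f j]) (by omega) hjle ?_ ?_ ?_ ?_
        · exact List.getLast?_concat
        · refine List.pairwise_append.mpr ⟨hpw, List.pairwise_singleton _ _, ?_⟩
          intro y hy z hz
          simp only [List.mem_singleton] at hz
          subst hz
          exact lt_of_le_of_lt (hub y hy) hjgt
        · intro y hy
          rcases List.mem_append.mp hy with hy | hy
          · exact le_of_lt (lt_of_le_of_lt (hub y hy) hjgt)
          · simp only [List.mem_singleton] at hy; omega
        · intro x
          constructor
          · intro hx
            rcases List.mem_append.mp hx with hx | hx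
            · obtain ⟨k, hk, hfk⟩ := (hmem x).mp hx
              exact ⟨k, by omega, hfk⟩
            · simp only [List.mem_singleton] at hx
              exact ⟨j, le_rfl, hx.symm⟩
          · rintro ⟨k, hk, hfk⟩
            by_cases hki : k ≤ i
            · exact List.mem_append.mpr (Or.inl ((hmem x).mpr ⟨k, hki, hfk⟩))
            · by_cases hkj : k = j
              · subst hkj
                exact List.mem_append.mpr (Or.inr (by simp [hfk]))
              · -- i < k < j: the binary search skipped k, so f k = f i
                have hklt : k < j := by omega
                have h1 : f k ≤ f i := hjmin k (by omega) hklt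
                have h2 : f i ≤ f k := hf i k (by omega) (by omega)
                exact List.mem_append.mpr (Or.inl ((hmem x).mpr ⟨i, le_rfl, by omega⟩))
    · rw [if_neg hin]
      have : i = n := by omega
      subst this
      exact ⟨hpw, hmem⟩

-- core: A's sorted(set(...)) equals B's binary-search walk
lemma sorted_ofList_eq_walk (L count : Int) (_hL0 : 0 ≤ L) (hL : L ≤ 2 ^ 32)
    (hcount : count ≤ 2 ^ 31 + 1) (hc : 1 < count) :
    PySem.List.sorted
        (PySem.Set.ofList ((PySem.List.pyRange 0 count 1).map (fun i => pvF L (count - 1) i)))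
        (fun x => x) false
      = pvWalk (fun k => pvF L (count - 1) ((k : Int))) (count - 1).toNat (count - 1).toNat 0
          [pvF L (count - 1) (((0:Nat) : Int))] := by
  set f : Nat → Int := fun k => pvF L (count - 1) ((k : Int)) with hfdef
  set n : Nat := (count - 1).toNat with hndef
  have hf : ∀ a b : Nat, a ≤ b → b ≤ n → f a ≤ f b := by
    intro a b hab hb
    exact pvF_mono hL (by omega) (by exact_mod_cast hab)
  have hW := pvWalk_spec f n hf n 0 [f 0] (by omega) (by omega) rfl
    (List.pairwise_singleton _ _)
    (by intro y hy; simp only [List.mem_singleton] at hy; omega)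
    (by
      intro x
      simp only [List.mem_singleton]
      constructor
      · intro hx; exact ⟨0, le_rfl, hx.symm⟩
      · rintro ⟨k, hk, hfk⟩
        have : k = 0 := by omega
        subst this
        exact hfk.symm)
  set W := pvWalk f n n 0 [f 0] with hWdef
  -- membership of the mapped range list
  have hmemL : ∀ x, x ∈ (PySem.List.pyRange 0 count 1).map (fun i => pvF L (count - 1) i) ↔
      ∃ k, k ≤ n ∧ f k = x := by
    intro x
    simp only [List.mem_map]
    constructor
    · rintro ⟨i, hi, hfi⟩
      obtain ⟨h0, h1⟩ := PySem.List.mem_pyRange_one.mp hi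
      refine ⟨i.toNat, by omega, ?_⟩
      show pvF L (count - 1) ((i.toNat : Int)) = x
      rw [show ((i.toNat : Int)) = i by omega]
      exact hfi
    · rintro ⟨k, hk, hfk⟩
      exact ⟨(k : Int), PySem.List.mem_pyRange_one.mpr ⟨by omega, by omega⟩, hfk⟩
  -- the two lists are nodup with the same members, hence a permutation
  have hnd1 : (PySem.Set.ofList
      ((PySem.List.pyRange 0 count 1).map (fun i => pvF L (count - 1) i))).Nodup :=
    PySem.Set.nodup_ofList _
  have hnd2 : W.Nodup := hW.1.imp ne_of_lt
  have hperm : (PySem.Set.ofList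
      ((PySem.List.pyRange 0 count 1).map (fun i => pvF L (count - 1) i))).Perm W := by
    rw [List.perm_ext_iff_of_nodup hnd1 hnd2]
    intro a
    rw [PySem.Set.mem_ofList, hmemL, hW.2]
  exact PySem.List.sorted_eq_of_perm_of_pairwise_lt _ _ _ hperm.symm hW.1

-- ===== VERDICT (by name: the statement is the Claim_ definition above) =====
theorem gen_positions_1d_py_spec : Claim_equal_gen_positions_1d_py := by
  intro length crop slots hdom
  unfold Spec_gen_positions_1d_py
  unfold Dom_gen_positions_1d_py at hdom
  simp only [pvDomInt, Bool.and_eq_true, decide_eq_true_eq] at hdom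
  unfold gen_positions_1d_py gen_positions_1d_py_alt linspace_indices_py
  by_cases hs : max slots 1 ≤ 1
  · simp only [if_pos hs]
  · simp only [if_neg hs]
    have hkey := sorted_ofList_eq_walk (max (length - crop) 0) (max slots 1)
      (by omega) (by omega) (by omega) (by omega)
    rw [hkey]
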